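-- pv_equiv track=rewrite | github.com/JosueMonteiroUchoaAlves/ProblemSolving | OBI/Concatena.py | func
-- ===== SOURCE A (Python) =====
-- def func(nums, nova):
--   somaTotal = 0
--   for a in range(len(nums)-1):
--     for z in range(a+1, len(nums)):
--       somaTotal += ((nums[a]* 10) + nums[z]) + ((nums[z]* 10) + nums[a])
--       nova[a].append(somaTotal)
--     somaTotal = 0
--   return nova
-- ===== SOURCE B (Python) =====
-- def func(nums, nova):
--     # Intermediate-sum formula via a prefix-sum table built once:
--     # each appended value is computed directly in O(1), no per-row running accumulator.
--     prefix = [0]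
--     for x in nums:
--         prefix.append(prefix[-1] + x)
--     n = len(nums)
--     for a in range(n - 1):
--         row = nova[a]
--         for z in range(a + 1, n):
--             row.append(11 * ((z - a) * nums[a] + (prefix[z + 1] - prefix[a + 1])))
--     return nova
-- ===== Notes on version B (the rewrite author's own statement) =====
-- stated objective: alternative
-- what changed: Replaces A's per-row running accumulator with a prefix-sum table built once up front, so each appended value is computed by a closed O(1) formula 11*((z-a)*nums[a] + (P[z+1]-P[a+1])) instead of carrying loop state.
import Mathlib
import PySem

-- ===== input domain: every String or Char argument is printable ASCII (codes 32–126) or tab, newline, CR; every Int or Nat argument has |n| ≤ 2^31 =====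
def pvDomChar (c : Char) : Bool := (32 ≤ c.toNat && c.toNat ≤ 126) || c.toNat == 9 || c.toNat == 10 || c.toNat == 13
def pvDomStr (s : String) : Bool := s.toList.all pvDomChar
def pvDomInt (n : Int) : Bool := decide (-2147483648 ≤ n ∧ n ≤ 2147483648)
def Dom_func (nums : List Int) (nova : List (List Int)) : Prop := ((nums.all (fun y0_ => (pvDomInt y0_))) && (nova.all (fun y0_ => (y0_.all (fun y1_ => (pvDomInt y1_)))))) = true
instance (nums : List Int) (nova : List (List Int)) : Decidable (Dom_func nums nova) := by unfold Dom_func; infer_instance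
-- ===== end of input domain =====

-- B replaces A's running accumulator with a prefix-sum table consulted by a closed formula;
-- both A and B mutate the rows of `nova` in place in Python (same mutation); the proof is about the return value.

-- ===== PORT A =====
def func (nums : List Int) (nova : List (List Int)) : List (List Int) :=
  (PySem.List.pyRange 0 ((nums.length : Int) - 1) 1).foldl (fun nv a =>
    ((PySem.List.pyRange (a + 1) (nums.length : Int) 1).foldl
      (fun (p : List (List Int) × Int) z =>
        let s := p.2 + ((PySem.List.pyGetD nums a 0 * 10 + PySem.List.pyGetD nums z 0)
                        + (PySem.List.pyGetD nums z 0 * 10 + PySem.List.pyGetD nums a 0))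
        (p.1.set a.toNat (PySem.List.pyGetD p.1 a [] ++ [s]), s))
      (nv, 0)).1) nova

-- ===== PORT B =====
def func_alt (nums : List Int) (nova : List (List Int)) : List (List Int) :=
  let pfx : List Int := nums.foldl (fun ps x => ps ++ [PySem.List.pyGetD ps (-1) 0 + x]) [0]
  let n : Int := nums.length
  (PySem.List.pyRange 0 (n - 1) 1).foldl (fun nv a =>
    nv.set a.toNat
      ((PySem.List.pyRange (a + 1) n 1).foldl
        (fun row z => row ++ [11 * ((z - a) * PySem.List.pyGetD nums a 0
            + (PySem.List.pyGetD pfx (z + 1) 0 - PySem.List.pyGetD pfx (a + 1) 0))])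
        (PySem.List.pyGetD nv a []))) nova

-- ===== PRECONDITION & SPEC =====
-- Pre_: Python A raises IndexError on nova[a] when nova has fewer than len(nums)-1 rows; excluded.
def Pre_func (nums : List Int) (nova : List (List Int)) : Prop := nums.length - 1 ≤ nova.length
instance (nums : List Int) (nova : List (List Int)) : Decidable (Pre_func nums nova) := by unfold Pre_func; infer_instance
def pvWitness_func : List Int × List (List Int) := ([1, 2, 3], [[], []])
def Spec_func (nums : List Int) (nova : List (List Int)) (out : List (List Int)) : Prop := out = func_alt nums nova
instance (nums : List Int) (nova : List (List Int)) (out : List (List Int)) : Decidable (Spec_func nums nova out) := by unfold Spec_func; infer_instance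

-- ===== CLAIM (what is proved, stated in full; the proofs are below) =====
def Claim_equal_func : Prop := ∀ (nums : List Int) (nova : List (List Int)), Dom_func nums nova → Pre_func nums nova → Spec_func nums nova (func nums nova)

-- ===== LEMMAS AND PROOFS =====

-- running partial sums of A's inner loop
def pvScan (f : Int → Int) : List Int → Int → List Int
  | [], _ => []
  | z :: t, s => (s + f z) :: pvScan f t (s + f z)

theorem pv_set_getD_self {α : Type} (nv : List α) (i : Nat) (d : α) :
    nv.set i (nv.getD i d) = nv := by
  by_cases h : i < nv.length
  · apply List.ext_getElem (by simp)
    intro k hk1 hk2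
    rw [List.getElem_set]
    split
    · next heq => subst heq; simp [List.getD, List.getElem?_eq_getElem h]
    · rfl
  · exact List.set_eq_of_length_le (by omega)

theorem pv_getD_set_self {α : Type} (nv : List α) (i : Nat) (L : α) (d : α) (h : i < nv.length) :
    (nv.set i L).getD i d = L := by
  simp [List.getD, h]

-- A's inner loop appends the running partial sums to row i (whatever the accumulator update f is)
theorem pv_innerA (f : Int → Int) (i : Nat) (zs : List Int) :
    ∀ (nv : List (List Int)) (s : Int),
    (zs.foldl (fun (p : List (List Int) × Int) z =>
        (p.1.set i (p.1.getD i [] ++ [p.2 + f z]), p.2 + f z)) (nv, s)).1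
      = nv.set i (nv.getD i [] ++ pvScan f zs s) := by
  induction zs with
  | nil => intro nv s; simpa [pvScan] using (pv_set_getD_self nv i []).symm
  | cons z t ih =>
    intro nv s
    by_cases h : i < nv.length
    · simp only [List.foldl_cons, ih, List.set_set,
        pv_getD_set_self nv i _ [] h, pvScan, List.append_assoc, List.singleton_append]
    · have hs : ∀ L, nv.set i L = nv := fun L => List.set_eq_of_length_le (by omega)
      simp only [List.foldl_cons, ih, hs, pvScan]  

-- prefix table built by B's first loop = sums of initial segments
theorem pv_pfx (nums : List Int) :
    nums.foldl (fun ps x => ps ++ [PySem.List.pyGetD ps (-1) 0 + x]) [0]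
      = (List.range (nums.length + 1)).map (fun k => ((nums.take k).sum : Int)) := by
  induction nums using List.reverseRecOn with
  | nil => simp
  | append_singleton ns x ih =>
    rw [List.foldl_append, ih, List.foldl_cons, List.foldl_nil]
    have hlast : PySem.List.pyGetD ((List.range (ns.length + 1)).map
        (fun k => ((ns.take k).sum : Int))) (-1) 0 = ns.sum := by
      rw [List.range_succ, List.map_append, List.map_singleton,
        PySem.List.pyGetD_neg_one_append_singleton, List.take_length]
    rw [hlast]
    have h2 : (ns ++ [x]).length + 1 = (ns.length + 1) + 1 := by simp
    rw [h2]
    conv_rhs => rw [List.range_succ, List.map_append, List.map_singleton]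
    congr 1
    · apply List.map_congr_left
      intro k hk
      simp only [List.mem_range] at hk
      rw [List.take_append_of_le_length (by omega)]
    · rw [List.take_of_length_le (by simp), List.sum_append, List.sum_singleton]

-- sum of first (k+1) elements
theorem pv_take_succ_sum (nums : List Int) (k : Nat) (h : k < nums.length) :
    ((nums.take (k + 1)).sum : Int) = (nums.take k).sum + nums.getD k 0 := by
  rw [List.take_add_one, List.sum_append]
  simp [List.getElem?_eq_getElem h, List.getD]

-- A's running sums over z = c, …, n-1 match B's closed formula
theorem pv_scan_formula (nums : List Int) (a : Int) (ha : 0 ≤ a) :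
    ∀ (k : Nat) (c : Int), a + 1 ≤ c → c = (nums.length : Int) - k →
    pvScan (fun z => (PySem.List.pyGetD nums a 0 * 10 + PySem.List.pyGetD nums z 0)
                     + (PySem.List.pyGetD nums z 0 * 10 + PySem.List.pyGetD nums a 0))
      (PySem.List.pyRange c (nums.length : Int) 1)
      (11 * ((c - (a + 1)) * PySem.List.pyGetD nums a 0
             + (((nums.take c.toNat).sum : Int) - (nums.take (a + 1).toNat).sum)))
      = (PySem.List.pyRange c (nums.length : Int) 1).map (fun z =>
          11 * ((z - a) * PySem.List.pyGetD nums a 0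
             + (((nums.take (z + 1).toNat).sum : Int) - (nums.take (a + 1).toNat).sum))) := by
  intro k
  induction k with
  | zero =>
    intro c _ hc
    rw [PySem.List.pyRange_one_eq_nil (by omega)]
    rfl
  | succ m ih =>
    intro c hac hc
    by_cases hcn : (nums.length : Int) ≤ c
    · rw [PySem.List.pyRange_one_eq_nil hcn]; rfl
    · rw [PySem.List.pyRange_one_cons (by omega)]
      simp only [pvScan, List.map_cons]
      have hc0 : 0 ≤ c := by omega
      have hclt : c.toNat < nums.length := by omega
      have hstep :
          11 * ((c - (a + 1)) * PySem.List.pyGetD nums a 0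
              + (((nums.take c.toNat).sum : Int) - (nums.take (a + 1).toNat).sum))
            + ((PySem.List.pyGetD nums a 0 * 10 + PySem.List.pyGetD nums c 0)
              + (PySem.List.pyGetD nums c 0 * 10 + PySem.List.pyGetD nums a 0))
          = 11 * ((c + 1 - (a + 1)) * PySem.List.pyGetD nums a 0
              + (((nums.take (c + 1).toNat).sum : Int) - (nums.take (a + 1).toNat).sum)) := by
        have h1 : (c + 1).toNat = c.toNat + 1 := by omega
        rw [h1, pv_take_succ_sum nums c.toNat hclt,
          PySem.List.pyGetD_of_nonneg nums (d := 0) hc0]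
        ring
      rw [hstep]
      exact congrArg₂ List.cons (by ring) (ih (c + 1) (by omega) (by omega))

-- ===== VERDICT (by name: the statement is the Claim_ definition above) =====
theorem func_spec : Claim_equal_func := by
  intro nums nova _ _
  unfold Spec_func func func_alt
  rw [pv_pfx]
  apply PySem.List.foldl_congr_mem
  intro nv a hmem
  rw [PySem.List.mem_pyRange_one] at hmem
  obtain ⟨ha0, han⟩ := hmem
  -- A's inner fold
  have hA := pv_innerA (fun z => (PySem.List.pyGetD nums a 0 * 10 + PySem.List.pyGetD nums z 0)
                     + (PySem.List.pyGetD nums z 0 * 10 + PySem.List.pyGetD nums a 0)) a.toNat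
      (PySem.List.pyRange (a + 1) (nums.length : Int) 1) nv 0
  -- identify the folded step functions
  have hgd : ∀ (p : List (List Int) × Int), PySem.List.pyGetD p.1 a ([] : List Int) = p.1.getD a.toNat [] :=
    fun p => PySem.List.pyGetD_of_nonneg _ _ ha0
  calc (List.foldl (fun (p : List (List Int) × Int) z =>
          (p.1.set a.toNat (PySem.List.pyGetD p.1 a [] ++ [p.2 + ((PySem.List.pyGetD nums a 0 * 10 + PySem.List.pyGetD nums z 0)
                        + (PySem.List.pyGetD nums z 0 * 10 + PySem.List.pyGetD nums a 0))]),
             p.2 + ((PySem.List.pyGetD nums a 0 * 10 + PySem.List.pyGetD nums z 0)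
                        + (PySem.List.pyGetD nums z 0 * 10 + PySem.List.pyGetD nums a 0))))
          (nv, 0) (PySem.List.pyRange (a + 1) (nums.length : Int) 1)).1
      = nv.set a.toNat (nv.getD a.toNat [] ++ pvScan _ (PySem.List.pyRange (a + 1) (nums.length : Int) 1) 0) := by
        rw [← hA]
        congr 1
        apply PySem.List.foldl_congr_mem
        intro p z _
        rw [hgd p]
    _ = _ := by
        have hsf := pv_scan_formula nums a ha0 ((nums.length : Int) - (a+1)).toNat (a+1) (by omega) (by omega)
        have h0 : 11 * ((a + 1 - (a + 1)) * PySem.List.pyGetD nums a 0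
             + (((nums.take (a+1).toNat).sum : Int) - (nums.take (a + 1).toNat).sum)) = (0 : Int) := by ring
        rw [h0] at hsf
        rw [hsf]
        rw [PySem.List.foldl_append_singleton_eq_map]
        rw [PySem.List.pyGetD_of_nonneg nv (d := []) ha0]
        congr 1
        congr 1
        apply List.map_congr_left
        intro z hz
        rw [PySem.List.mem_pyRange_one] at hz
        have hz1 : (0:Int) ≤ z + 1 := by omega
        have hza : (0:Int) ≤ a + 1 := by omega
        rw [PySem.List.pyGetD_of_nonneg _ (d := 0) hz1, PySem.List.pyGetD_of_nonneg _ (d := 0) hza,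
          PySem.List.getD_map_range _ _ _ _ (by omega), PySem.List.getD_map_range _ _ _ _ (by omega)]
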